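-- pv_equiv track=rewrite | github.com/Yayong-guan/mlcode | spectral_cluster.py | get_k_min_index
-- ===== SOURCE A (Python) =====
-- def get_k_min_index(data, k):
--     m = len(data)
--     if m < k:
--         return -1
--     # 创建一个跟踪数组，其内容为原数组中元素的下标，
--     # 用于记录元素的交换（即代替元素的交换）
--     # 按顺序以track数组中的数据为下标访问元素
--     track = list()
--     for i in range(m):
--         track.append(i)
--     index = calc_k_min(data, track, 0, m - 1, k)
--
--     return index
--
-- def calc_k_min(data, track, left, right, k):
--     centre = data[track[right]]
--     i = left
--     j = right - 1
--     while True: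
--         while data[track[i]] < centre:
--             i += 1
--         # 从后向前扫描时要检查下标，防止数组越界
--         while j >= left and data[track[j]] > centre:
--             j -= 1
--         # 如果没有完成一趟交换，则交换，注意，是交换跟踪数组的值
--         if i < j:
--             track[i], track[j] = track[j], track[i]
--         else:
--             break
--     # 把枢纽放在正确的位置
--     track[i], track[right] = track[right], track[i]
--     # 如果此时centre的位置刚好为k，则centre为第k个最小的数，
--     # 返回其在真实数组中的下标，即track[i]
--     if (i + 1) == k:
--         return track[i]
--     elif (i + 1) < k:
--         # 如果此时centre的位置比k前,递归地在其右边寻找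
--         k_min = calc_k_min(data, track, i + 1, right, k)
--     else:
--         # 如果此时centre的位置比k后,递归地在其左边寻找
--         k_min = calc_k_min(data, track, left, i - 1, k)
--
--     return k_min
-- ===== SOURCE B (Python) =====
-- def get_k_min_index(data, k):
--     if k < 1 or len(data) < k:
--         return -1
--     order = sorted(range(len(data)), key=lambda i: data[i])
--     return order[k - 1]
-- ===== Notes on version B (the rewrite author's own statement) =====
-- stated objective: alternative
-- what changed: Replaces the recursive index-tracking quickselect (Hoare-style partition over a separate track array) by a stable argsort of the index range followed by a single lookup at position k-1; Pre_ excludes k < 1 (A raises) and duplicate-valued lists with k <= len(data), where A's pivot path makes the returned tie index accidental and can even loop forever.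
-- outside the precondition, e.g. on get_k_min_index([2, 2], 1): A returns 1, B returns 0; on get_k_min_index([5, 5, 5], 2): A does not finish within the time limit, B returns 1; on get_k_min_index([7, 7], 2): A returns 0, B returns 1
import Mathlib
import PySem

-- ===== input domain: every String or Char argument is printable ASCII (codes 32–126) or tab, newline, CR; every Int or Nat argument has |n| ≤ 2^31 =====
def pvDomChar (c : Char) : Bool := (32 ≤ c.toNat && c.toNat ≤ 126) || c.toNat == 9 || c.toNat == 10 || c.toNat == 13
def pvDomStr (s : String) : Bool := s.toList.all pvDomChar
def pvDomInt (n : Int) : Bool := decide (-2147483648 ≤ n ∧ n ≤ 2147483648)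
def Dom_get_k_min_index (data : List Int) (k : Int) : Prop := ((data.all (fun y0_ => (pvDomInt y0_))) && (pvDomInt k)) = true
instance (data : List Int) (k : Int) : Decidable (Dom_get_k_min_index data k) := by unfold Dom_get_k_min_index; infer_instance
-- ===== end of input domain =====

-- B replaces A's recursive index-tracking quickselect with a stable argsort plus one lookup
-- (alternative algorithm, proved equal for k ≥ 1 whenever the values are distinct or k > len(data)).

-- ===== PORT A =====
-- A's while-loops are ported fuel-bounded; on every input admitted by Pre_ the fuel is
-- provably never exhausted, so the port computes exactly what the Python computes there.

-- while data[track[i]] < centre: i += 1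
def pvScanI (data track : List Int) (centre : Int) : Nat → Int → Int
  | 0, i => i
  | fuel+1, i =>
    match PySem.List.pyGet? track i with
    | none => i
    | some t =>
      match PySem.List.pyGet? data t with
      | none => i
      | some v => if v < centre then pvScanI data track centre fuel (i+1) else i

-- while j >= left and data[track[j]] > centre: j -= 1
def pvScanJ (data track : List Int) (centre left : Int) : Nat → Int → Int
  | 0, j => j
  | fuel+1, j =>
    if left ≤ j then
      match PySem.List.pyGet? track j with
      | none => j
      | some t =>
        match PySem.List.pyGet? data t with
        | none => j
        | some v => if centre < v then pvScanJ data track centre left fuel (j-1) else j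
    else j

-- track[i], track[j] = track[j], track[i]
def pvSwap (xs : List Int) (i j : Int) : List Int :=
  match PySem.List.pyGet? xs i, PySem.List.pyGet? xs j with
  | some vi, some vj => PySem.List.pySetD (PySem.List.pySetD xs i vj) j vi
  | _, _ => xs

-- the 'while True' partition loop of calc_k_min
def pvPartLoop (data : List Int) (centre left : Int) : Nat → List Int → Int → Int → List Int × Int
  | 0, track, i, _ => (track, i)
  | fuel+1, track, i, j =>
    let i' := pvScanI data track centre (track.length + 1) i
    let j' := pvScanJ data track centre left (track.length + 1) j
    if i' < j' then pvPartLoop data centre left fuel (pvSwap track i' j') i' j'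
    else (track, i')

def pvCalcKMin (data : List Int) : Nat → List Int → Int → Int → Int → Int
  | 0, _, _, _, _ => -1
  | fuel+1, track, left, right, k =>
    let centre := PySem.List.pyGetD data (PySem.List.pyGetD track right 0) 0
    let out := pvPartLoop data centre left (track.length + 2) track left (right - 1)
    let track' := pvSwap out.1 out.2 right
    if out.2 + 1 = k then PySem.List.pyGetD track' out.2 0
    else if out.2 + 1 < k then pvCalcKMin data fuel track' (out.2 + 1) right k
    else pvCalcKMin data fuel track' left (out.2 - 1) k

def get_k_min_index (data : List Int) (k : Int) : Int :=
  let m : Int := (data.length : Int)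
  if m < k then -1
  else
    let track := (PySem.List.pyRange 0 m 1).foldl (fun tr i => tr ++ [i]) []
    pvCalcKMin data (data.length + 1) track 0 (m - 1) k

-- ===== PORT B =====
def get_k_min_index_alt (data : List Int) (k : Int) : Int :=
  if k < 1 ∨ (data.length : Int) < k then -1
  else
    let order := PySem.List.sorted (PySem.List.pyRange 0 (data.length : Int) 1)
                   (fun i => PySem.List.pyGetD data i 0) false
    PySem.List.pyGetD order (k - 1) 0   -- order[k-1]; in range whenever 1 ≤ k ≤ len(data)

-- ===== PRECONDITION & SPEC =====
-- Pre_ excludes k < 1, where A raises, and duplicate-valued lists with k ≤ len(data) — there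
-- A's returned index among tied elements is an accident of its pivot path and A can even loop
-- forever; duplicate lists with k > len(data) stay inside (both sides return -1).
def Pre_get_k_min_index (data : List Int) (k : Int) : Prop :=
  1 ≤ k ∧ (data.Nodup ∨ (data.length : Int) < k)
instance (data : List Int) (k : Int) : Decidable (Pre_get_k_min_index data k) := by
  unfold Pre_get_k_min_index; infer_instance

def pvWitness_get_k_min_index : List Int × Int := ([3, 1, 2], 2)

def Spec_get_k_min_index (data : List Int) (k : Int) (out : Int) : Prop := out = get_k_min_index_alt data k
instance (data : List Int) (k : Int) (out : Int) : Decidable (Spec_get_k_min_index data k out) := by unfold Spec_get_k_min_index; infer_instance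

-- ===== CLAIM (what is proved, stated in full; the proofs are below) =====
def Claim_equal_get_k_min_index : Prop := ∀ (data : List Int) (k : Int), Dom_get_k_min_index data k → Pre_get_k_min_index data k → Spec_get_k_min_index data k (get_k_min_index data k)


-- ===== LEMMAS AND PROOFS =====

-- position access and value access used throughout the proofs
def pvAt (tr : List Int) (p : Int) : Int := PySem.List.pyGetD tr p 0
def pvVal (data : List Int) (x : Int) : Int := PySem.List.pyGetD data x 0
def pvIds (n : Nat) : List Int := (List.range n).map (Nat.cast : Nat → Int)

-- the characterising predicate: r is a valid original index and exactly k-1 indices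
-- carry a strictly smaller value
def PvP (data : List Int) (k : Int) (r : Int) : Prop :=
  r ∈ pvIds data.length ∧
  ((pvIds data.length).countP (fun q => decide (pvVal data q < pvVal data r)) : Int) = k - 1

theorem pvIds_nodup (n : Nat) : (pvIds n).Nodup := by
  unfold pvIds
  exact List.nodup_range.map (by intro a b h; exact_mod_cast h)

theorem mem_pvIds {n : Nat} {x : Int} : x ∈ pvIds n ↔ 0 ≤ x ∧ x < (n : Int) := by
  unfold pvIds
  simp only [List.mem_map, List.mem_range]
  constructor
  · rintro ⟨a, ha, rfl⟩; omega
  · rintro ⟨h0, h1⟩; exact ⟨x.toNat, by omega, by omega⟩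

theorem pyRange_ids (m : Nat) : PySem.List.pyRange 0 (m : Int) 1 = pvIds m := by
  rw [PySem.List.pyRange_one]
  simp [pvIds]

theorem length_pvIds (n : Nat) : (pvIds n).length = n := by
  simp [pvIds]

theorem pvAt_eq_getElem (tr : List Int) (p : Int) (h0 : 0 ≤ p) (h1 : p < tr.length)
    : pvAt tr p = tr[p.toNat]'(by omega) := by
  unfold pvAt
  exact PySem.List.pyGetD_eq_getElem tr 0 h0 h1

theorem pvAt_mem (tr : List Int) (p : Int) (h0 : 0 ≤ p) (h1 : p < tr.length) : pvAt tr p ∈ tr := by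
  rw [pvAt_eq_getElem tr p h0 h1]
  exact List.getElem_mem _

theorem pvGet?_at (tr : List Int) (p : Int) (h0 : 0 ≤ p) (h1 : p < tr.length)
    : PySem.List.pyGet? tr p = some (pvAt tr p) := by
  rw [pvAt_eq_getElem tr p h0 h1]
  exact PySem.List.pyGet?_eq_some_getElem tr h0 h1

theorem pvAt_inj {tr : List Int} (hn : tr.Nodup) {p q : Int}
    (hp0 : 0 ≤ p) (hp1 : p < tr.length) (hq0 : 0 ≤ q) (hq1 : q < tr.length)
    (h : pvAt tr p = pvAt tr q) : p = q := by
  rw [pvAt_eq_getElem tr p hp0 hp1, pvAt_eq_getElem tr q hq0 hq1] at h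
  have := (List.Nodup.getElem_inj_iff hn).mp h
  omega

theorem pvVal_inj {data : List Int} (hd : data.Nodup) {x y : Int}
    (hx : x ∈ pvIds data.length) (hy : y ∈ pvIds data.length)
    (h : pvVal data x = pvVal data y) : x = y := by
  rw [mem_pvIds] at hx hy
  unfold pvVal at h
  rw [PySem.List.pyGetD_eq_getElem data 0 hx.1 (by omega),
      PySem.List.pyGetD_eq_getElem data 0 hy.1 (by omega)] at h
  have := (List.Nodup.getElem_inj_iff hd).mp h
  omega

theorem list_set_swap_perm (l : List Int) (p q : Nat) (hp : p < l.length) (hq : q < l.length) :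
    ((l.set p (l[q])).set q (l[p])).Perm l := by
  rw [List.perm_iff_count]
  intro a
  have hql : q < (l.set p l[q]).length := by simpa using hq
  rw [List.count_set hql, List.count_set hp]
  rw [List.getElem_set]
  have h1 : 1 ≤ List.count l[p] l := List.count_pos_iff.mpr (List.getElem_mem hp)
  have h2 : 1 ≤ List.count l[q] l := List.count_pos_iff.mpr (List.getElem_mem hq)
  simp only [beq_iff_eq]
  split_ifs <;> simp_all

theorem pvSwap_eq (tr : List Int) (p q : Int)
    (hp0 : 0 ≤ p) (hp1 : p < tr.length) (hq0 : 0 ≤ q) (hq1 : q < tr.length)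
    : pvSwap tr p q = (tr.set p.toNat (pvAt tr q)).set q.toNat (pvAt tr p) := by
  unfold pvSwap
  rw [pvGet?_at tr p hp0 hp1, pvGet?_at tr q hq0 hq1]
  dsimp only
  rw [PySem.List.pySetD_of_nonneg tr _ hp0, PySem.List.pySetD_of_nonneg _ _ hq0]

theorem pvSwap_length (tr : List Int) (p q : Int) : (pvSwap tr p q).length = tr.length := by
  unfold pvSwap
  cases PySem.List.pyGet? tr p <;> cases PySem.List.pyGet? tr q <;>
    simp [PySem.List.length_pySetD]

theorem pvAt_pvSwap (tr : List Int) (p q r : Int)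
    (hp0 : 0 ≤ p) (hp1 : p < tr.length) (hq0 : 0 ≤ q) (hq1 : q < tr.length)
    (hr0 : 0 ≤ r) (hr1 : r < tr.length)
    : pvAt (pvSwap tr p q) r = if r = q then pvAt tr p else if r = p then pvAt tr q else pvAt tr r := by
  rw [pvSwap_eq tr p q hp0 hp1 hq0 hq1]
  have hlen : ((tr.set p.toNat (pvAt tr q)).set q.toNat (pvAt tr p)).length = tr.length := by simp
  rw [pvAt_eq_getElem _ r hr0 (by omega)]
  rw [List.getElem_set, List.getElem_set]
  rw [pvAt_eq_getElem tr r hr0 hr1]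
  split_ifs <;> first | rfl | omega

theorem pvSwap_perm (tr : List Int) (p q : Int)
    (hp0 : 0 ≤ p) (hp1 : p < tr.length) (hq0 : 0 ≤ q) (hq1 : q < tr.length)
    : (pvSwap tr p q).Perm tr := by
  rw [pvSwap_eq tr p q hp0 hp1 hq0 hq1]
  rw [pvAt_eq_getElem tr p hp0 hp1, pvAt_eq_getElem tr q hq0 hq1]
  exact list_set_swap_perm tr p.toNat q.toNat (by omega) (by omega)

-- counting by positions
theorem pvCountP_of_pos_iff (tr : List Int) (P : Int → Bool) (t : Nat) (ht : t ≤ tr.length)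
    (h : ∀ p (hp : p < tr.length), P tr[p] = true ↔ p < t) : tr.countP P = t := by
  induction tr generalizing t with
  | nil => simp only [List.countP_nil]; simp at ht; omega
  | cons x xs ih =>
    have h0 := h 0 (by simp)
    simp only [List.getElem_cons_zero] at h0
    rw [List.countP_cons]
    cases t with
    | zero =>
      have hx : ¬ (P x = true) := by simp at h0; simp [h0]
      have hxs := ih 0 (by omega) (fun p hp => by
        have h' := h (p+1) (by simp; omega)
        rw [List.getElem_cons_succ] at h'
        simpa using h')
      simp [hx, hxs]
    | succ t' =>
      have hx : P x = true := h0.mpr (by omega)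
      have hxs := ih t' (by simp at ht; omega) (fun p hp => by
        have h' := h (p+1) (by simp; omega)
        rw [List.getElem_cons_succ] at h'
        constructor
        · intro hh; have := h'.mp hh; omega
        · intro hh; exact h'.mpr (by omega))
      simp [hx, hxs]

-- strict monotonicity of countP
theorem pvCountP_lt (l : List Int) (p q : Int → Bool) (hpq : ∀ x, p x = true → q x = true)
    (a : Int) (ha : a ∈ l) (haq : q a = true) (hap : p a = false) : l.countP p < l.countP q := by
  induction l with
  | nil => simp at ha
  | cons y ys ih =>
    rw [List.countP_cons, List.countP_cons]
    rcases List.mem_cons.mp ha with rfl | hmem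
    · have hys := List.countP_mono_left (l := ys) (fun x _ hx => hpq x hx)
      simp [hap, haq]
      omega
    · have h1 := ih hmem
      by_cases hp : p y = true
      · simp [hp, hpq y hp]; omega
      · simp [hp]; split_ifs <;> omega

-- uniqueness of the characterised index
theorem pvP_unique {data : List Int} (hd : data.Nodup) {k r1 r2 : Int}
    (h1 : PvP data k r1) (h2 : PvP data k r2) : r1 = r2 := by
  obtain ⟨hm1, hc1⟩ := h1
  obtain ⟨hm2, hc2⟩ := h2
  rcases lt_trichotomy (pvVal data r1) (pvVal data r2) with hlt | heq | hgt
  · exfalso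
    have := pvCountP_lt (pvIds data.length)
      (fun q => decide (pvVal data q < pvVal data r1))
      (fun q => decide (pvVal data q < pvVal data r2))
      (fun x hx => by simp at hx ⊢; omega)
      r1 hm1 (by simp [hlt]) (by simp)
    omega
  · exact pvVal_inj hd hm1 hm2 heq
  · exfalso
    have := pvCountP_lt (pvIds data.length)
      (fun q => decide (pvVal data q < pvVal data r2))
      (fun q => decide (pvVal data q < pvVal data r1))
      (fun x hx => by simp at hx ⊢; omega)
      r2 hm2 (by simp [hgt]) (by simp)
    omega

-- a permutation that agrees outside positions [l, r] maps segment values into segment values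
theorem pvSegment_transport {tr tr' : List Int} (hperm : tr'.Perm tr) (hn : tr.Nodup)
    {l r q : Int} (hagree : ∀ p : Int, 0 ≤ p → p < (tr.length : Int) → p < l ∨ r < p → pvAt tr' p = pvAt tr p)
    (hl : l ≤ q) (hr : q ≤ r) (h0 : 0 ≤ q) (h1 : q < tr.length)
    : ∃ q', l ≤ q' ∧ q' ≤ r ∧ 0 ≤ q' ∧ q' < tr.length ∧ pvAt tr q' = pvAt tr' q := by
  have hlen : tr'.length = tr.length := hperm.length_eq
  have hn' : tr'.Nodup := (hperm.nodup_iff).mpr hn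
  have hx : pvAt tr' q ∈ tr' := pvAt_mem tr' q h0 (by omega)
  have hxtr : pvAt tr' q ∈ tr := (hperm.mem_iff).mp hx
  obtain ⟨n, hnlen, hne⟩ := List.mem_iff_getElem.mp hxtr
  have hatn : pvAt tr (n : Int) = pvAt tr' q := by
    rw [pvAt_eq_getElem tr (n : Int) (by omega) (by omega)]
    simpa using hne
  by_cases hin : l ≤ (n : Int) ∧ (n : Int) ≤ r
  · exact ⟨(n : Int), hin.1, hin.2, by omega, by omega, hatn⟩
  · exfalso
    have hout : (n : Int) < l ∨ r < (n : Int) := by omega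
    have := hagree (n : Int) (by omega) (by omega) hout
    have heq : pvAt tr' (n : Int) = pvAt tr' q := by rw [this, hatn]
    have := pvAt_inj hn' (p := (n : Int)) (q := q) (by omega) (by omega) h0 (by omega) heq
    omega

-- scan specifications
theorem pvGet?_val (d : List Int) (x : Int) (h0 : 0 ≤ x) (h1 : x < d.length)
    : PySem.List.pyGet? d x = some (pvVal d x) := pvGet?_at d x h0 h1

theorem pvScanI_spec (data track : List Int) (centre : Int)
    (hent : ∀ x ∈ track, 0 ≤ x ∧ x < data.length)
    : ∀ (fuel : Nat) (i s : Int), 0 ≤ i → i ≤ s → s < track.length →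
    ¬ (pvVal data (pvAt track s) < centre) → (s - i).toNat + 1 ≤ fuel →
    i ≤ pvScanI data track centre fuel i ∧ pvScanI data track centre fuel i ≤ s ∧
    ¬ (pvVal data (pvAt track (pvScanI data track centre fuel i)) < centre) ∧
    (∀ p, i ≤ p → p < pvScanI data track centre fuel i → pvVal data (pvAt track p) < centre) := by
  intro fuel
  induction fuel with
  | zero => intro i s h0 his hs hstop hfuel; omega
  | succ f ih =>
    intro i s h0 his hs hstop hfuel
    have hit : 0 ≤ i ∧ i < (track.length : Int) := by omega
    have htmem : pvAt track i ∈ track := pvAt_mem track i hit.1 hit.2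
    have htb := hent _ htmem
    simp only [pvScanI]
    rw [pvGet?_at track i hit.1 hit.2]
    dsimp only
    rw [pvGet?_val data (pvAt track i) htb.1 htb.2]
    dsimp only
    by_cases hv : pvVal data (pvAt track i) < centre
    · rw [if_pos hv]
      have hine : i ≠ s := by
        intro hh; rw [hh] at hv; exact hstop hv
      have := ih (i+1) s (by omega) (by omega) hs hstop (by omega)
      refine ⟨by omega, this.2.1, this.2.2.1, ?_⟩
      intro p hp1 hp2
      by_cases hpi : p = i
      · rw [hpi]; exact hv
      · exact this.2.2.2 p (by omega) hp2
    · rw [if_neg hv]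
      exact ⟨le_refl i, his, hv, fun p hp1 hp2 => by omega⟩

theorem pvScanJ_spec (data track : List Int) (centre left : Int) (hleft : 0 ≤ left)
    (hent : ∀ x ∈ track, 0 ≤ x ∧ x < data.length)
    : ∀ (fuel : Nat) (j : Int), left - 1 ≤ j → j < track.length →
    (j - (left - 1)).toNat + 1 ≤ fuel →
    left - 1 ≤ pvScanJ data track centre left fuel j ∧ pvScanJ data track centre left fuel j ≤ j ∧
    (∀ q, pvScanJ data track centre left fuel j < q → q ≤ j → centre < pvVal data (pvAt track q)) ∧
    (pvScanJ data track centre left fuel j < left ∨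
      ¬ (centre < pvVal data (pvAt track (pvScanJ data track centre left fuel j)))) := by
  intro fuel
  induction fuel with
  | zero => intro j hj0 hjlen hfuel; omega
  | succ f ih =>
    intro j hj0 hjlen hfuel
    simp only [pvScanJ]
    by_cases hlj : left ≤ j
    · rw [if_pos hlj]
      have hjt : 0 ≤ j ∧ j < (track.length : Int) := by omega
      have htmem : pvAt track j ∈ track := pvAt_mem track j hjt.1 hjt.2
      have htb := hent _ htmem
      rw [pvGet?_at track j hjt.1 hjt.2]
      dsimp only
      rw [pvGet?_val data (pvAt track j) htb.1 htb.2]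
      dsimp only
      by_cases hv : centre < pvVal data (pvAt track j)
      · rw [if_pos hv]
        have := ih (j-1) (by omega) (by omega) (by omega)
        refine ⟨this.1, by omega, ?_, this.2.2.2⟩
        intro q hq1 hq2
        by_cases hqj : q = j
        · rw [hqj]; exact hv
        · exact this.2.2.1 q hq1 (by omega)
      · rw [if_neg hv]
        exact ⟨by omega, le_refl j, fun q hq1 hq2 => by omega, Or.inr hv⟩
    · rw [if_neg hlj]
      exact ⟨by omega, le_refl j, fun q hq1 hq2 => by omega, Or.inl (by omega)⟩

-- the partition loop: invariant-carrying specification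
theorem pvPartLoop_spec (data : List Int) (hd : data.Nodup) (centre left right : Int)
    (hl0 : 0 ≤ left) (hlr : left ≤ right) (hrm : right < data.length)
    : ∀ (fuel : Nat) (track : List Int) (i j a b : Int),
    track.Perm (pvIds data.length) →
    pvVal data (pvAt track right) = centre →
    left ≤ i → i ≤ a → a ≤ right →
    left - 1 ≤ j → left - 1 ≤ b → b ≤ j → j ≤ right - 1 →
    (∀ p, left ≤ p → p < a → pvVal data (pvAt track p) < centre) →
    (∀ q, b < q → q ≤ right - 1 → centre < pvVal data (pvAt track q)) →
    (b + 1 - a).toNat + 1 ≤ fuel →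
    (pvPartLoop data centre left fuel track i j).1.Perm track ∧
    (∀ p : Int, 0 ≤ p → p < (track.length : Int) → p < left ∨ right - 1 < p →
      pvAt (pvPartLoop data centre left fuel track i j).1 p = pvAt track p) ∧
    left ≤ (pvPartLoop data centre left fuel track i j).2 ∧
    (pvPartLoop data centre left fuel track i j).2 ≤ right ∧
    (∀ p, left ≤ p → p < (pvPartLoop data centre left fuel track i j).2 →
      pvVal data (pvAt (pvPartLoop data centre left fuel track i j).1 p) < centre) ∧
    (∀ q, (pvPartLoop data centre left fuel track i j).2 ≤ q → q ≤ right - 1 →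
      centre < pvVal data (pvAt (pvPartLoop data centre left fuel track i j).1 q)) := by
  intro fuel
  induction fuel with
  | zero => intro track i j a b _ _ _ _ _ _ _ _ _ _ _ hfuel; omega
  | succ f ih =>
    intro track i j a b htr hpiv hi hia har hj hb0 hbj hjr hA hB hfuel
    have hlen : track.length = data.length := by
      rw [htr.length_eq, length_pvIds]
    have hent : ∀ x ∈ track, 0 ≤ x ∧ x < (data.length : Int) := fun x hx =>
      mem_pvIds.mp ((htr.mem_iff).mp hx)
    have htrnd : track.Nodup := (htr.nodup_iff).mpr (pvIds_nodup _)
    set SI := pvScanI data track centre (track.length + 1) i with hSI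
    set SJ := pvScanJ data track centre left (track.length + 1) j with hSJ
    have hstep : pvPartLoop data centre left (f+1) track i j =
        if SI < SJ then pvPartLoop data centre left f (pvSwap track SI SJ) SI SJ
        else (track, SI) := rfl
    have hIsp := pvScanI_spec data track centre hent (track.length + 1) i right
      (by omega) (by omega) (by omega)
      (by rw [hpiv]; exact lt_irrefl centre) (by omega)
    rw [← hSI] at hIsp
    have hJsp := pvScanJ_spec data track centre left (by omega) hent (track.length + 1) j
      (by omega) (by omega) (by omega)
    rw [← hSJ] at hJsp
    obtain ⟨hI1, hI2, hI3, hI4⟩ := hIsp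
    obtain ⟨hJ1, hJ2, hJ3, hJ4⟩ := hJsp
    -- SI is at least the ghost bound a, SJ at most b
    have hSIa : a ≤ SI := by
      by_contra hc
      exact absurd (hA SI (by omega) (by omega)) hI3
    have hSJb : SJ ≤ b := by
      by_contra hc
      have hgt := hB SJ (by omega) (by omega)
      rcases hJ4 with hlt | hnv
      · omega
      · exact hnv hgt
    -- values at [left, SI) are < centre, at (SJ, right-1] are > centre
    have hAall : ∀ p, left ≤ p → p < SI → pvVal data (pvAt track p) < centre := by
      intro p hp1 hp2
      by_cases hpa : p < a
      · exact hA p hp1 hpa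
      · exact hI4 p (by omega) hp2
    have hBall : ∀ q, SJ < q → q ≤ right - 1 → centre < pvVal data (pvAt track q) := by
      intro q hq1 hq2
      by_cases hqj : q ≤ j
      · exact hJ3 q hq1 hqj
      · exact hB q (by omega) hq2
    -- no position strictly left of `right` carries the pivot value
    have hnp : ∀ p, 0 ≤ p → p < right → pvVal data (pvAt track p) ≠ centre := by
      intro p hp0 hp1 heq
      have hmem1 : pvAt track p ∈ pvIds data.length :=
        (htr.mem_iff).mp (pvAt_mem track p hp0 (by omega))
      have hmem2 : pvAt track right ∈ pvIds data.length :=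
        (htr.mem_iff).mp (pvAt_mem track right (by omega) (by omega))
      have hveq : pvVal data (pvAt track p) = pvVal data (pvAt track right) := by
        rw [heq, hpiv]
      have := pvVal_inj hd hmem1 hmem2 hveq
      have := pvAt_inj htrnd hp0 (by omega) (by omega : (0:Int) ≤ right) (by omega) this
      omega
    by_cases hcase : SI < SJ
    · -- swap and continue
      have hSJleft : left ≤ SJ := by omega
      have hSJv : ¬ (centre < pvVal data (pvAt track SJ)) := by
        rcases hJ4 with h | h
        · omega
        · exact h
      have hSJlt : pvVal data (pvAt track SJ) < centre := by
        have hne := hnp SJ (by omega) (by omega)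
        omega
      have hSIgt : centre < pvVal data (pvAt track SI) := by
        have hne := hnp SI (by omega) (by omega)
        omega
      have hb1 : 0 ≤ SI := by omega
      have hb2 : SI < (track.length : Int) := by omega
      have hb3 : 0 ≤ SJ := by omega
      have hb4 : SJ < (track.length : Int) := by omega
      have hswlen : (pvSwap track SI SJ).length = track.length := pvSwap_length track SI SJ
      have hswat : ∀ r, 0 ≤ r → r < (track.length : Int) →
          pvAt (pvSwap track SI SJ) r =
          if r = SJ then pvAt track SI else if r = SI then pvAt track SJ else pvAt track r :=
        fun r h0 h1 => pvAt_pvSwap track SI SJ r hb1 hb2 hb3 hb4 h0 h1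
      have hih := ih (pvSwap track SI SJ) SI SJ (SI + 1) (SJ - 1)
        ((pvSwap_perm track SI SJ hb1 hb2 hb3 hb4).trans htr)
        (by rw [hswat right (by omega) (by omega)]
            rw [if_neg (by omega), if_neg (by omega)]
            exact hpiv)
        (by omega) (by omega) (by omega) (by omega) (by omega) (by omega) (by omega)
        (by intro p hp1 hp2
            rw [hswat p (by omega) (by omega)]
            by_cases hpj : p = SJ
            · omega
            · rw [if_neg hpj]
              by_cases hpi : p = SI
              · rw [if_pos hpi]; exact hSJlt
              · rw [if_neg hpi]; exact hAall p hp1 (by omega))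
        (by intro q hq1 hq2
            rw [hswat q (by omega) (by omega)]
            by_cases hqj : q = SJ
            · rw [if_pos hqj]; exact hSIgt
            · rw [if_neg hqj, if_neg (by omega)]
              exact hBall q (by omega) hq2)
        (by omega)
      rw [hstep, if_pos hcase]
      rw [hswlen] at hih
      obtain ⟨c1, c2, c3, c4, c5, c6⟩ := hih
      refine ⟨c1.trans (pvSwap_perm track SI SJ hb1 hb2 hb3 hb4), ?_, c3, c4, c5, c6⟩
      intro p hp0 hplen hpout
      rw [c2 p hp0 (by omega) hpout]
      rw [hswat p hp0 (by exact_mod_cast hplen)]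
      rw [if_neg (by omega), if_neg (by omega)]
    · -- exit: i' ≥ j', pivot position found
      rw [hstep, if_neg hcase]
      refine ⟨List.Perm.refl track, fun p _ _ _ => rfl, by omega, by omega, hAall, ?_⟩
      intro q hq1 hq2
      by_cases hqj : SJ < q
      · exact hBall q hqj hq2
      · -- q ≤ SJ ≤ SI ≤ q forces q = SI = SJ, impossible by the pivot-value argument
        exfalso
        have hqeq : q = SI ∧ SI = SJ := by omega
        have hv1 : ¬ (pvVal data (pvAt track SI) < centre) := hI3
        have hv2 : ¬ (centre < pvVal data (pvAt track SI)) := by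
          rcases hJ4 with h | h
          · omega
          · rw [hqeq.2]; exact h
        have := hnp SI (by omega) (by omega)
        omega

-- the quickselect recursion returns an index satisfying PvP
theorem pvCalcKMin_spec (data : List Int) (hd : data.Nodup) (k : Int)
    : ∀ (fuel : Nat) (track : List Int) (left right : Int),
    track.Perm (pvIds data.length) →
    0 ≤ left → left ≤ k - 1 → k - 1 ≤ right → right < data.length →
    (∀ p q, 0 ≤ p → p < left → left ≤ q → q ≤ right →
      pvVal data (pvAt track p) < pvVal data (pvAt track q)) →
    (∀ p q, left ≤ p → p ≤ right → right < q → q < data.length →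
      pvVal data (pvAt track p) < pvVal data (pvAt track q)) →
    (right - left).toNat + 1 ≤ fuel →
    PvP data k (pvCalcKMin data fuel track left right k) := by
  intro fuel
  induction fuel with
  | zero => intro track left right _ _ _ _ _ _ _ hfuel; omega
  | succ f ih =>
    intro track left right htr hl0 hlk hkr hrm hInvL hInvR hfuel
    have hlen : track.length = data.length := by rw [htr.length_eq, length_pvIds]
    have hlr : left ≤ right := by omega
    set C : Int := pvVal data (pvAt track right) with hC
    set OUT := pvPartLoop data C left (track.length + 2) track left (right - 1) with hOUT
    have hstep : pvCalcKMin data (f+1) track left right k =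
        (if OUT.2 + 1 = k then pvAt (pvSwap OUT.1 OUT.2 right) OUT.2
         else if OUT.2 + 1 < k then pvCalcKMin data f (pvSwap OUT.1 OUT.2 right) (OUT.2 + 1) right k
         else pvCalcKMin data f (pvSwap OUT.1 OUT.2 right) left (OUT.2 - 1) k) := rfl
    have hPL := pvPartLoop_spec data hd C left right hl0 hlr hrm (track.length + 2)
      track left (right - 1) left (right - 1) htr hC.symm (le_refl left) (le_refl left) hlr
      (by omega) (by omega) (le_refl _) (le_refl _)
      (by intro p h1 h2; exact absurd h2 (by omega))
      (by intro q h1 h2; exact absurd h1 (by omega))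
      (by omega)
    rw [← hOUT] at hPL
    obtain ⟨hperm, hagree, hi1, hi2, hA', hB'⟩ := hPL
    have hTlen : OUT.1.length = track.length := hperm.length_eq
    have hI0 : 0 ≤ OUT.2 := by omega
    set T2 := pvSwap OUT.1 OUT.2 right with hT2
    have hat2 : ∀ r : Int, 0 ≤ r → r < (track.length : Int) →
        pvAt T2 r = if r = right then pvAt OUT.1 OUT.2
          else if r = OUT.2 then pvAt OUT.1 right else pvAt OUT.1 r := by
      intro r h0 h1
      exact pvAt_pvSwap OUT.1 OUT.2 right r hI0 (by omega) (by omega) (by omega) h0 (by omega)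
    have hT2len : T2.length = track.length := by
      rw [hT2, pvSwap_length, hTlen]
    have hT2perm : T2.Perm (pvIds data.length) :=
      ((pvSwap_perm OUT.1 OUT.2 right hI0 (by omega) (by omega) (by omega)).trans hperm).trans htr
    have hT2permtr : T2.Perm track :=
      (pvSwap_perm OUT.1 OUT.2 right hI0 (by omega) (by omega) (by omega)).trans hperm
    have hTright : pvAt OUT.1 right = pvAt track right :=
      hagree right (by omega) (by omega) (by omega)
    have hvI : pvVal data (pvAt T2 OUT.2) = C := by
      rw [hat2 OUT.2 hI0 (by omega)]
      by_cases h : OUT.2 = right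
      · rw [if_pos h, h, hTright]
      · rw [if_neg h, if_pos rfl, hTright]
    have hvLess : ∀ p, left ≤ p → p < OUT.2 → pvVal data (pvAt T2 p) < C := by
      intro p h1 h2
      rw [hat2 p (by omega) (by omega), if_neg (by omega), if_neg (by omega)]
      exact hA' p h1 h2
    have hvMore : ∀ q, OUT.2 < q → q ≤ right → C < pvVal data (pvAt T2 q) := by
      intro q h1 h2
      rw [hat2 q (by omega) (by omega)]
      by_cases hq : q = right
      · rw [if_pos hq]
        exact hB' OUT.2 (le_refl _) (by omega)
      · rw [if_neg hq, if_neg (by omega)]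
        exact hB' q (by omega) (by omega)
    have hOutside : ∀ p : Int, 0 ≤ p → p < (track.length : Int) → p < left ∨ right < p →
        pvAt T2 p = pvAt track p := by
      intro p h0 h1 hout
      rw [hat2 p h0 h1, if_neg (by omega), if_neg (by omega)]
      exact hagree p h0 h1 (by omega)
    have hvOutL : ∀ p, 0 ≤ p → p < left → pvVal data (pvAt T2 p) < C := by
      intro p h0 h1
      rw [hOutside p h0 (by omega) (Or.inl h1), hC]
      exact hInvL p right h0 h1 (by omega) (le_refl right)
    have hvOutR : ∀ q, right < q → q < (data.length : Int) → C < pvVal data (pvAt T2 q) := by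
      intro q h1 h2
      rw [hOutside q (by omega) (by omega) (Or.inr h1), hC]
      exact hInvR right q (by omega) (le_refl right) h1 h2
    have htrnd : track.Nodup := (htr.nodup_iff).mpr (pvIds_nodup _)
    have htrans : ∀ q, left ≤ q → q ≤ right →
        ∃ q', left ≤ q' ∧ q' ≤ right ∧ 0 ≤ q' ∧ q' < (track.length : Int) ∧
          pvAt track q' = pvAt T2 q := by
      intro q h1 h2
      have := pvSegment_transport hT2permtr htrnd
        (l := left) (r := right) (q := q) hOutside h1 h2 (by omega) (by omega)
      obtain ⟨q', c1, c2, c3, c4, c5⟩ := this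
      exact ⟨q', c1, c2, c3, by exact_mod_cast c4, c5⟩
    rw [hstep]
    by_cases hk1 : OUT.2 + 1 = k
    · rw [if_pos hk1]
      refine ⟨(hT2perm.mem_iff).mp (pvAt_mem T2 OUT.2 hI0 (by omega)), ?_⟩
      have hcount : (pvIds data.length).countP
          (fun q => decide (pvVal data q < pvVal data (pvAt T2 OUT.2))) = OUT.2.toNat := by
        rw [← List.Perm.countP_eq _ hT2perm]
        apply pvCountP_of_pos_iff
        · omega
        · intro p hp
          have hco : pvAt T2 (p : Int) = T2[p] := by
            rw [pvAt_eq_getElem T2 (p : Int) (by omega) (by exact_mod_cast hp)]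
            simp
          simp only [decide_eq_true_eq]
          rw [← hco, hvI]
          have hreg : pvVal data (pvAt T2 (p : Int)) < C ↔ (p : Int) < OUT.2 := by
            constructor
            · intro hlt
              by_contra hge
              rw [not_lt] at hge
              have hnot : ¬ (pvVal data (pvAt T2 (p : Int)) < C) := by
                by_cases he : (p : Int) = OUT.2
                · rw [he, hvI]; exact lt_irrefl C
                · by_cases hr : (p : Int) ≤ right
                  · have := hvMore (p : Int) (by omega) hr; omega
                  · have := hvOutR (p : Int) (by omega) (by omega); omega
              exact hnot hlt
            · intro hlt
              by_cases hpl : (p : Int) < left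
              · exact hvOutL (p : Int) (by omega) hpl
              · exact hvLess (p : Int) (by omega) hlt
          rw [hreg]
          omega
      rw [hcount]
      omega
    · rw [if_neg hk1]
      by_cases hk2 : OUT.2 + 1 < k
      · rw [if_pos hk2]
        apply ih T2 (OUT.2 + 1) right hT2perm (by omega) (by omega) hkr hrm ?_ ?_ (by omega)
        · intro p q hp0 hp1 hq1 hq2
          have hqv : C < pvVal data (pvAt T2 q) := hvMore q (by omega) hq2
          have hpv : pvVal data (pvAt T2 p) ≤ C := by
            by_cases hpl : p < left
            · exact le_of_lt (hvOutL p hp0 hpl)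
            · by_cases hpi : p = OUT.2
              · rw [hpi, hvI]
              · exact le_of_lt (hvLess p (by omega) (by omega))
          omega
        · intro p q hp1 hp2 hq1 hq2
          obtain ⟨p', a1, a2, a3, a4, a5⟩ := htrans p (by omega) hp2
          rw [← a5, hOutside q (by omega) (by omega) (Or.inr hq1)]
          exact hInvR p' q a1 a2 hq1 hq2
      · rw [if_neg hk2]
        apply ih T2 left (OUT.2 - 1) hT2perm hl0 hlk (by omega) (by omega) ?_ ?_ (by omega)
        · intro p q hp0 hp1 hq1 hq2
          obtain ⟨q', b1, b2, b3, b4, b5⟩ := htrans q hq1 (by omega)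
          rw [← b5, hOutside p hp0 (by omega) (Or.inl hp1)]
          exact hInvL p q' hp0 hp1 b1 b2
        · intro p q hp1 hp2 hq1 hq2
          have hpv : pvVal data (pvAt T2 p) < C := hvLess p hp1 (by omega)
          have hqv : C ≤ pvVal data (pvAt T2 q) := by
            by_cases hq : q = OUT.2
            · rw [hq, hvI]
            · by_cases hqr : q ≤ right
              · exact le_of_lt (hvMore q (by omega) hqr)
              · exact le_of_lt (hvOutR q (by omega) hq2)
          omega

-- B's result satisfies PvP
theorem pvAlt_P (data : List Int) (hd : data.Nodup) (k : Int) (hk1 : 1 ≤ k)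
    (hkm : k ≤ (data.length : Int)) : PvP data k (get_k_min_index_alt data k) := by
  have hguard : ¬ (k < 1 ∨ (data.length : Int) < k) := by omega
  have hstep : get_k_min_index_alt data k =
      PySem.List.pyGetD (PySem.List.sorted (PySem.List.pyRange 0 (data.length : Int) 1)
        (fun i => PySem.List.pyGetD data i 0) false) (k - 1) 0 := by
    unfold get_k_min_index_alt
    rw [if_neg hguard]
  rw [hstep, pyRange_ids]
  set L := PySem.List.sorted (pvIds data.length) (fun i => PySem.List.pyGetD data i 0) false
    with hL
  have hLperm : L.Perm (pvIds data.length) := PySem.List.sorted_perm _ _ _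
  have hLlen : L.length = data.length := by rw [hLperm.length_eq, length_pvIds]
  have hLnd : L.Nodup := (hLperm.nodup_iff).mpr (pvIds_nodup _)
  have hLmem : ∀ x ∈ L, x ∈ pvIds data.length := fun x hx => (hLperm.mem_iff).mp hx
  have hpair : ∀ (i j : Nat) (hi : i < L.length) (hj : j < L.length), i < j →
      pvVal data L[i] ≤ pvVal data L[j] := by
    have := List.pairwise_iff_getElem.mp
      (PySem.List.sorted_pairwise (pvIds data.length) (fun i => PySem.List.pyGetD data i 0))
    exact fun i j hi hj hij => this i j hi hj hij
  set t : Nat := (k - 1).toNat with ht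
  have htlen : t < L.length := by omega
  have hres : PySem.List.pyGetD L (k - 1) 0 = L[t] := by
    rw [PySem.List.pyGetD_eq_getElem L 0 (by omega) (by omega)]
  rw [hres]
  refine ⟨hLmem L[t] (List.getElem_mem htlen), ?_⟩
  have hcount : (pvIds data.length).countP
      (fun q => decide (pvVal data q < pvVal data L[t])) = t := by
    rw [← List.Perm.countP_eq _ hLperm]
    apply pvCountP_of_pos_iff
    · omega
    · intro p hp
      simp only [decide_eq_true_eq]
      constructor
      · intro hlt
        by_contra hge
        rw [not_lt] at hge
        have hle : pvVal data L[t] ≤ pvVal data L[p] := by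
          rcases Nat.lt_or_ge t p with h | h
          · exact hpair t p htlen hp h
          · have hpt : p = t := by omega
            subst hpt
            exact le_refl _
        omega
      · intro hlt
        have hle : pvVal data L[p] ≤ pvVal data L[t] := hpair p t hp htlen hlt
        have hne : pvVal data L[p] ≠ pvVal data L[t] := by
          intro heq
          have := pvVal_inj hd (hLmem _ (List.getElem_mem hp)) (hLmem _ (List.getElem_mem htlen)) heq
          have := (List.Nodup.getElem_inj_iff hLnd).mp this
          omega
        omega
  rw [hcount]
  omega

-- A's result satisfies PvP
theorem pvA_P (data : List Int) (hd : data.Nodup) (k : Int) (hk1 : 1 ≤ k)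
    (hkm : k ≤ (data.length : Int)) : PvP data k (get_k_min_index data k) := by
  have hne : ¬ ((data.length : Int) < k) := by omega
  have hstep : get_k_min_index data k =
      pvCalcKMin data (data.length + 1)
        ((PySem.List.pyRange 0 (data.length : Int) 1).foldl (fun tr i => tr ++ [i]) [])
        0 ((data.length : Int) - 1) k := by
    unfold get_k_min_index
    rw [if_neg hne]
  have htrack : (PySem.List.pyRange 0 (data.length : Int) 1).foldl (fun tr i => tr ++ [i]) []
      = pvIds data.length := by
    have := PySem.List.foldl_append_singleton_eq_map (fun (i : Int) => i)
      (PySem.List.pyRange 0 (data.length : Int) 1) []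
    simpa [pyRange_ids] using this
  rw [hstep, htrack]
  exact pvCalcKMin_spec data hd k (data.length + 1) (pvIds data.length) 0
    ((data.length : Int) - 1) (List.Perm.refl _) (le_refl 0) (by omega) (by omega) (by omega)
    (by intro p q h0 h1 h2 h3; omega)
    (by intro p q h0 h1 h2 h3; omega)
    (by omega)

-- ===== VERDICT (by name: the statement is the Claim_ definition above) =====
theorem get_k_min_index_spec : Claim_equal_get_k_min_index := by
  intro data k _ hpre
  obtain ⟨hk1, hor⟩ := hpre
  unfold Spec_get_k_min_index
  by_cases hkm : (data.length : Int) < k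
  · unfold get_k_min_index get_k_min_index_alt
    simp [hkm]
  · rw [not_lt] at hkm
    have hd : data.Nodup := by
      rcases hor with h | h
      · exact h
      · exact absurd h (by omega)
    exact pvP_unique hd (pvA_P data hd k hk1 hkm) (pvAlt_P data hd k hk1 hkm)
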